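-- pv_equiv track=rewrite | github.com/smuradoglu/phc | phonotactic_corpora_analysis1.py | wrm_clean
-- ===== SOURCE A (Python) =====
-- def wrm_clean(lexical_list):
--     headword =[]
--     pos=[]
--     gloss=[]
--     #Go over each lexeme
--     for i in range(len(lexical_list)):
--         lexeme = lexical_list[i]
--         if [k for k in lexeme if '\\w ' in k] !=[]:
--             l = [k for k in lexeme if '\\w ' in k]
--             lx_clean = l[0].split('\\w ')[-1].split('\n')[0]
--             headword.append(lx_clean)
--         else:
--             headword.append('-')
--         if [l for l in lexeme if '\\p ' in l] !=[]:
--             p = [l for l in lexeme if '\\p ' in l]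
--             ps_clean = p[0].split('\\p ')[-1].split('\n')[0]
--             pos.append(ps_clean)
--         else:
--             pos.append('-')
--         if [m for m in lexeme if '\\d ' in m] !=[]:
--             d = [m for m in lexeme if '\\d ' in m]
--             de_clean = d[0].split('\\d ')[-1].split('\n')[0]
--             gloss.append(de_clean)
--         else:
--             gloss.append('-')
--     return headword, pos, gloss
-- ===== SOURCE B (Python) =====
-- def wrm_clean(lexical_list):
--     headword = []
--     pos = []
--     gloss = []
--     for lexeme in lexical_list:
--         hw = ps = gl = None
--         for line in lexeme:
--             if hw is None and '\\w ' in line: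
--                 hw = line.split('\\w ')[-1].split('\n')[0]
--             if ps is None and '\\p ' in line:
--                 ps = line.split('\\p ')[-1].split('\n')[0]
--             if gl is None and '\\d ' in line:
--                 gl = line.split('\\d ')[-1].split('\n')[0]
--         headword.append(hw if hw is not None else '-')
--         pos.append(ps if ps is not None else '-')
--         gloss.append(gl if gl is not None else '-')
--     return headword, pos, gloss
-- ===== Notes on version B (the rewrite author's own statement) =====
-- stated objective: simpler
-- what changed: One single pass over each lexeme's lines with None sentinels replaces A's six list-comprehension scans (three filter passes each built twice) per lexeme.
import Mathlib
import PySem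

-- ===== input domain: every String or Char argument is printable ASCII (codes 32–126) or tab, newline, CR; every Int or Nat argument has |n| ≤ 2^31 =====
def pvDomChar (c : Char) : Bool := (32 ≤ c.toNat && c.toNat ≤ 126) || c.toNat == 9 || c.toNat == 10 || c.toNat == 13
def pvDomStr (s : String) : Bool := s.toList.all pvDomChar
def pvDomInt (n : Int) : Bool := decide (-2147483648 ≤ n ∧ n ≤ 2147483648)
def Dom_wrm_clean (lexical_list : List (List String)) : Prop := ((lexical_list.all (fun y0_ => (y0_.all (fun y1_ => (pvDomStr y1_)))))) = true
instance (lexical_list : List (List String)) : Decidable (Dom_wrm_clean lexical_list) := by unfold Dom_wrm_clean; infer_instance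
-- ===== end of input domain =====

-- B replaces A's six per-lexeme list-comprehension scans by ONE pass over the lexeme's
-- lines with Option (None) sentinels; same return value, simpler traversal.

-- ===== PORT A =====
-- l[0].split(mk)[-1].split('\n')[0]  (mk and '\n' are non-empty, so split? is always some)
def pvExtractA (mk s : String) : String :=
  ((PySem.Str.split? (((PySem.Str.split? s mk).getD [s]).getLastD "") "\n").getD [""]).headD ""

-- one iteration of A's 'for i in range(len(lexical_list))' body (three filter passes)
def pvStepA (acc : List String × List String × List String) (lexeme : List String) :
    List String × List String × List String :=
  let h := if lexeme.filter (fun k => PySem.Str.isIn "\\w " k) ≠ [] then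
      acc.1 ++ [pvExtractA "\\w " ((lexeme.filter (fun k => PySem.Str.isIn "\\w " k)).headD "")]
    else acc.1 ++ ["-"]
  let p := if lexeme.filter (fun l => PySem.Str.isIn "\\p " l) ≠ [] then
      acc.2.1 ++ [pvExtractA "\\p " ((lexeme.filter (fun l => PySem.Str.isIn "\\p " l)).headD "")]
    else acc.2.1 ++ ["-"]
  let g := if lexeme.filter (fun m => PySem.Str.isIn "\\d " m) ≠ [] then
      acc.2.2 ++ [pvExtractA "\\d " ((lexeme.filter (fun m => PySem.Str.isIn "\\d " m)).headD "")]
    else acc.2.2 ++ ["-"]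
  (h, p, g)

def wrm_clean (lexical_list : List (List String)) : List String × List String × List String :=
  lexical_list.foldl pvStepA ([], [], [])

-- ===== PORT B =====
def pvExtractB (mk s : String) : String :=
  ((PySem.Str.split? (((PySem.Str.split? s mk).getD [s]).getLastD "") "\n").getD [""]).headD ""

-- one line of the inner single pass: fill each still-None field on its first matching line
def pvStepB (st : Option String × Option String × Option String) (line : String) :
    Option String × Option String × Option String :=
  let hw := if st.1.isNone && PySem.Str.isIn "\\w " line then some (pvExtractB "\\w " line) else st.1
  let ps := if st.2.1.isNone && PySem.Str.isIn "\\p " line then some (pvExtractB "\\p " line) else st.2.1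
  let gl := if st.2.2.isNone && PySem.Str.isIn "\\d " line then some (pvExtractB "\\d " line) else st.2.2
  (hw, ps, gl)

def wrm_clean_alt (lexical_list : List (List String)) : List String × List String × List String :=
  lexical_list.foldl
    (fun acc lexeme =>
      let st := lexeme.foldl pvStepB (none, none, none)
      (acc.1 ++ [st.1.getD "-"], acc.2.1 ++ [st.2.1.getD "-"], acc.2.2 ++ [st.2.2.getD "-"]))
    ([], [], [])

-- ===== PRECONDITION & SPEC =====
def Spec_wrm_clean (lexical_list : List (List String)) (out : List String × List String × List String) : Prop := out = wrm_clean_alt lexical_list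
instance (lexical_list : List (List String)) (out : List String × List String × List String) : Decidable (Spec_wrm_clean lexical_list out) := by unfold Spec_wrm_clean; infer_instance

-- ===== CLAIM (what is proved, stated in full; the proofs are below) =====
def Claim_equal_wrm_clean : Prop := ∀ (lexical_list : List (List String)), Dom_wrm_clean lexical_list → Spec_wrm_clean lexical_list (wrm_clean lexical_list)

-- ===== LEMMAS AND PROOFS =====

-- the single-field scan B performs (one Option accumulator)
def pvOptScan (p : String → Bool) (f : String → String) (l : List String) (o : Option String) :
    Option String :=
  l.foldl (fun s line => if s.isNone && p line then some (f line) else s) o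

-- A's per-lexeme field value, one marker
def pvFieldA (mk : String) (lexeme : List String) : String :=
  if lexeme.filter (fun k => PySem.Str.isIn mk k) ≠ [] then
    pvExtractA mk ((lexeme.filter (fun k => PySem.Str.isIn mk k)).headD "")
  else "-"

theorem pvOptScan_some (p : String → Bool) (f : String → String) (l : List String) (v : String) :
    pvOptScan p f l (some v) = some v := by
  induction l with
  | nil => rfl
  | cons a l ih =>
    have h1 : pvOptScan p f (a :: l) (some v) = pvOptScan p f l (some v) := by
      simp [pvOptScan, List.foldl_cons]
    rw [h1]; exact ih

theorem pvOptScan_none (p : String → Bool) (f : String → String) (l : List String) :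
    pvOptScan p f l none = ((l.filter p).head?).map f := by
  induction l with
  | nil => rfl
  | cons a l ih =>
    by_cases h : p a = true
    · have h1 : pvOptScan p f (a :: l) none = pvOptScan p f l (some (f a)) := by
        simp [pvOptScan, List.foldl_cons, h]
      rw [h1, pvOptScan_some]; simp [h]
    · have h1 : pvOptScan p f (a :: l) none = pvOptScan p f l none := by
        simp [pvOptScan, List.foldl_cons, h]
      simp only [Bool.not_eq_true] at h
      rw [h1, ih]; simp [List.find?_cons, h]

-- A's branch equals B's scan, per marker
theorem pvField_eq (mk : String) (lexeme : List String) :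
    pvFieldA mk lexeme
      = (pvOptScan (fun k => PySem.Str.isIn mk k) (fun k => pvExtractB mk k) lexeme none).getD "-" := by
  rw [pvOptScan_none]
  unfold pvFieldA
  cases h : lexeme.filter (fun k => PySem.Str.isIn mk k) with
  | nil => simp
  | cons x xs => simp [pvExtractA, pvExtractB]

-- B's three-field fold splits into three independent scans
theorem pvStepB_fold (lexeme : List String) (st : Option String × Option String × Option String) :
    lexeme.foldl pvStepB st
      = (pvOptScan (fun k => PySem.Str.isIn "\\w " k) (fun k => pvExtractB "\\w " k) lexeme st.1,
         pvOptScan (fun k => PySem.Str.isIn "\\p " k) (fun k => pvExtractB "\\p " k) lexeme st.2.1,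
         pvOptScan (fun k => PySem.Str.isIn "\\d " k) (fun k => pvExtractB "\\d " k) lexeme st.2.2) := by
  induction lexeme generalizing st with
  | nil => rfl
  | cons a l ih =>
    simp only [List.foldl_cons, ih]
    rfl

-- both outer folds, with general accumulators, as appended maps
theorem pvFoldA_eq (L : List (List String)) (acc : List String × List String × List String) :
    L.foldl pvStepA acc
      = (acc.1 ++ L.map (pvFieldA "\\w "), acc.2.1 ++ L.map (pvFieldA "\\p "),
         acc.2.2 ++ L.map (pvFieldA "\\d ")) := by
  induction L generalizing acc with
  | nil => simp
  | cons x L ih =>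
    rw [List.foldl_cons, ih]
    simp only [List.map_cons, pvStepA, pvFieldA]
    refine Prod.ext ?_ (Prod.ext ?_ ?_) <;> simp <;> split_ifs <;> simp

theorem pvFoldB_eq (L : List (List String)) (acc : List String × List String × List String) :
    L.foldl
      (fun acc lexeme =>
        let st := lexeme.foldl pvStepB (none, none, none)
        (acc.1 ++ [st.1.getD "-"], acc.2.1 ++ [st.2.1.getD "-"], acc.2.2 ++ [st.2.2.getD "-"])) acc
      = (acc.1 ++ L.map (pvFieldA "\\w "), acc.2.1 ++ L.map (pvFieldA "\\p "),
         acc.2.2 ++ L.map (pvFieldA "\\d ")) := by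
  induction L generalizing acc with
  | nil => simp
  | cons x L ih =>
    rw [List.foldl_cons, ih]
    simp only [List.map_cons, pvStepB_fold, pvField_eq]
    simp

-- ===== VERDICT (by name: the statement is the Claim_ definition above) =====
theorem wrm_clean_spec : Claim_equal_wrm_clean := by
  intro L _
  unfold Spec_wrm_clean wrm_clean wrm_clean_alt
  rw [pvFoldA_eq, pvFoldB_eq]
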